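-- pv_equiv track=rewrite | github.com/dotcomaki/BSCS1002_Python | Week 3/GrPA5.py | fiveTimes
-- ===== SOURCE A (Python) =====
-- def fiveTimes(num):
--     for i in range(10):
--         fiveStr = num[i] * 5
--         if fiveStr in num:
--             return 0
--         else:
--             pass
--     return 1
-- ===== SOURCE B (Python) =====
-- def fiveTimes(num):
--     # One pass over num building the set of characters that occur in a run
--     # of length >= 5; then check the first ten characters against that set.
--     runset = set()
--     prev = None
--     run = 0
--     for c in num:
--         if c == prev:
--             run += 1
--         else:
--             prev = c
--             run = 1
--         if run >= 5:
--             runset.add(c)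
--     for i in range(10):
--         if num[i] in runset:
--             return 0
--     return 1
-- ===== Notes on version B (the rewrite author's own statement) =====
-- stated objective: alternative
-- what changed: Replaces the ten whole-string substring scans (one per checked character) by a single pass that records every character occurring in a run of length at least 5 in a set, then checks the first ten characters against that set.
import Mathlib
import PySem

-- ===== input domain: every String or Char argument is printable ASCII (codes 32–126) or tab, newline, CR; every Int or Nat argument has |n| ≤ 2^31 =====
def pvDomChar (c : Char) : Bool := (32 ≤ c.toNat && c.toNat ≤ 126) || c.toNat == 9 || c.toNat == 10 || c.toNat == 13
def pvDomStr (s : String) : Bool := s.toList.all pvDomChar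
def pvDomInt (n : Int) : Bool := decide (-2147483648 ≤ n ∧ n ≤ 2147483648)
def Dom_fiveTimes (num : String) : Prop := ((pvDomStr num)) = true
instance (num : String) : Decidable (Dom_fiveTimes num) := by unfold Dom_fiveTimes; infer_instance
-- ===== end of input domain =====

-- B replaces A's ten whole-string substring scans by one pass that collects the
-- characters with a run of length >= 5 into a set, then checks the first ten
-- characters against that set (objective: alternative, same asymptotic cost).

-- ===== PORT A =====
-- the 'for i in range(10)' loop of A; 'none' (Python: IndexError, outside Pre_) returns 0
def pvAGo (cs : List Char) : List Int → Int
  | [] => 1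
  | i :: rest =>
    match PySem.List.pyGet? cs i with
    | none => 0
    | some c => if PySem.Chars.isIn (List.replicate 5 c) cs then 0 else pvAGo cs rest

def fiveTimes (num : String) : Int :=
  pvAGo num.toList (PySem.List.pyRange 0 10 1)

-- ===== PORT B =====
-- B's first loop: runset of characters whose run reaches length 5
def pvRuns : List Char → Option Char → Nat → PySem.Set Char → PySem.Set Char
  | [], _, _, s => s
  | c :: rest, prev, run, s =>
    let run' := if some c = prev then run + 1 else 1
    pvRuns rest (some c) run' (if 5 ≤ run' then PySem.Set.add s c else s)

-- B's second loop; 'none' (IndexError, outside Pre_) returns 0 like pvAGo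
def pvBGo (cs : List Char) (rs : PySem.Set Char) : List Int → Int
  | [] => 1
  | i :: rest =>
    match PySem.List.pyGet? cs i with
    | none => 0
    | some c => if PySem.Set.contains rs c then 0 else pvBGo cs rs rest

def fiveTimes_alt (num : String) : Int :=
  pvBGo num.toList (pvRuns num.toList none 0 PySem.Set.empty) (PySem.List.pyRange 0 10 1)

-- ===== PRECONDITION & SPEC =====
-- Pre_ excludes exactly the inputs where A raises IndexError: strings shorter than 10
-- none of whose characters has a run of length >= 5 (there the loop walks past the end).
def Pre_fiveTimes (num : String) : Prop :=
  10 ≤ num.toList.length ∨ ∃ c ∈ num.toList, List.replicate 5 c <:+: num.toList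
instance (num : String) : Decidable (Pre_fiveTimes num) := by unfold Pre_fiveTimes; infer_instance
def pvWitness_fiveTimes : String := "abcdefghij"

def Spec_fiveTimes (num : String) (out : Int) : Prop := out = fiveTimes_alt num
instance (num : String) (out : Int) : Decidable (Spec_fiveTimes num out) := by unfold Spec_fiveTimes; infer_instance

-- ===== CLAIM (what is proved, stated in full; the proofs are below) =====
def Claim_equal_fiveTimes : Prop := ∀ (num : String), Dom_fiveTimes num → Pre_fiveTimes num → Spec_fiveTimes num (fiveTimes num)

-- ===== LEMMAS AND PROOFS =====

-- a run of 5 does not fit in a list shorter than 5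
theorem pv_not_infix_short {x : Char} {l : List Char} (h : l.length < 5) :
    ¬ List.replicate 5 x <:+: l := by
  intro hinf
  have := hinf.length_le
  simp only [List.length_replicate] at this
  omega

-- a nonempty run whose character differs from the head lies in the tail
theorem pv_infix_drop_head {x a : Char} {l : List Char} {n : ℕ}
    (h : List.replicate (n + 1) x <:+: a :: l) (hne : a ≠ x) :
    List.replicate (n + 1) x <:+: l := by
  rcases List.infix_cons_iff.mp h with hpre | hinf
  · exfalso
    rw [List.replicate_succ] at hpre
    rcases hpre with ⟨t, ht⟩
    have : a = x := by
      have := congrArg (fun l => l.head?) ht.symm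
      simpa using this
    exact hne this
  · exact hinf

-- monotonicity: an infix of l is an infix of a :: l
theorem pv_infix_cons_of_infix {s l : List Char} {a : Char}
    (h : s <:+: l) : s <:+: a :: l :=
  h.trans (List.suffix_cons a l).isInfix

-- with at most 4 leading p's and a blocking c ≠ p, a p-run of 5 must live in rest
theorem pv_infix_strip (p c : Char) (rest : List Char) :
    ∀ m, m ≤ 4 → c ≠ p →
      List.replicate 5 p <:+: List.replicate m p ++ c :: rest →
      List.replicate 5 p <:+: rest
  | 0, _, hne, h => by
      simpa using pv_infix_drop_head (n := 4) (by simpa using h) hne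
  | m + 1, hm, hne, h => by
      rw [show List.replicate (m + 1) p = p :: List.replicate m p from List.replicate_succ ..,
        List.cons_append] at h
      rcases List.infix_cons_iff.mp h with hpre | hinf
      · exfalso
        have hlt : m + 1 < (List.replicate 5 p).length := by
          simp only [List.length_replicate]; omega
        have hidx : (List.replicate 5 p)[m + 1]'hlt =
            (p :: (List.replicate m p ++ c :: rest))[m + 1]'(by
              simp only [List.length_cons, List.length_append, List.length_replicate]; omega) :=
          List.IsPrefix.getElem hpre _
        have h1 : (List.replicate 5 p)[m + 1]'hlt = p := List.getElem_replicate ..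
        have h2 : (p :: (List.replicate m p ++ c :: rest))[m + 1]'(by
            simp only [List.length_cons, List.length_append, List.length_replicate]; omega) = c := by
          rw [List.getElem_cons_succ, List.getElem_append_right (by simp)]
          simp
        rw [h1, h2] at hidx
        exact hne hidx.symm
      · exact pv_infix_strip p c rest m (by omega) hne hinf

-- a run of a character other than p jumps over any p-block
theorem pv_infix_strip_ne (x p : Char) (l : List Char) :
    ∀ m, x ≠ p →
      List.replicate 5 x <:+: List.replicate m p ++ l →
      List.replicate 5 x <:+: l
  | 0, _, h => by simpa using h
  | m + 1, hne, h => by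
      rw [show List.replicate (m + 1) p = p :: List.replicate m p from List.replicate_succ ..,
        List.cons_append] at h
      exact pv_infix_strip_ne x p l m hne
        (pv_infix_drop_head (n := 4) h (fun hpx => hne hpx.symm))

-- set-membership invariant of B's run-collecting pass, with prev = some p and run = r:
-- the context behaves like (at most four) trailing p's in front of cs
theorem pv_mem_runs (x : Char) :
    ∀ (cs : List Char) (p : Char) (r : ℕ) (s : PySem.Set Char),
      x ∈ pvRuns cs (some p) r s ↔
        x ∈ s ∨ List.replicate 5 x <:+: List.replicate (min r 4) p ++ cs
  | [], p, r, s => by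
      simp only [pvRuns, List.append_nil]
      constructor
      · exact Or.inl
      · rintro (h | h)
        · exact h
        · exact absurd h (pv_not_infix_short (by
            simp only [List.length_replicate]; omega))
  | c :: rest, p, r, s => by
      simp only [pvRuns]
      by_cases hcp : c = p
      · subst hcp
        rw [if_pos rfl]
        rw [pv_mem_runs x rest c (r + 1) _]
        by_cases hr : 5 ≤ r + 1
        · rw [if_pos hr, PySem.Set.mem_add,
            show min (r + 1) 4 = 4 from by omega, show min r 4 = 4 from by omega,
            show List.replicate 4 c ++ c :: rest = List.replicate 5 c ++ rest from by
              simp [List.replicate_succ']]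
          constructor
          · rintro ((hs | hx) | hinf)
            · exact Or.inl hs
            · exact Or.inr (hx ▸ (List.prefix_append _ _).isInfix)
            · refine Or.inr ?_
              rw [show List.replicate 5 c ++ rest = c :: (List.replicate 4 c ++ rest) from by
                simp [List.replicate_succ]]
              exact pv_infix_cons_of_infix hinf
          · rintro (hs | hinf)
            · exact Or.inl (Or.inl hs)
            · by_cases hx : x = c
              · exact Or.inl (Or.inr hx)
              · refine Or.inr ?_
                rw [show List.replicate 5 c ++ rest = c :: (List.replicate 4 c ++ rest) from by
                  simp [List.replicate_succ]] at hinf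
                exact pv_infix_drop_head (n := 4) hinf (fun hcx => hx hcx.symm)
        · rw [if_neg hr,
            show min (r + 1) 4 = r + 1 from by omega, show min r 4 = r from by omega,
            show List.replicate r c ++ c :: rest = List.replicate (r + 1) c ++ rest from by
              simp [List.replicate_succ']]
      · rw [if_neg (by simpa using hcp), if_neg (by omega)]
        rw [pv_mem_runs x rest c 1 s]
        have h1 : min 1 4 = 1 := by omega
        rw [h1]
        constructor
        · rintro (hs | hinf)
          · exact Or.inl hs
          · exact Or.inr ((by simpa using hinf : List.replicate 5 x <:+: c :: rest).trans
              (List.suffix_append _ _).isInfix)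
        · rintro (hs | hinf)
          · exact Or.inl hs
          · refine Or.inr ?_
            have hgoal : List.replicate 5 x <:+: c :: rest := by
              by_cases hxp : x = p
              · subst hxp
                exact pv_infix_cons_of_infix
                  (pv_infix_strip x c rest (min r 4) (by omega) hcp hinf)
              · exact pv_infix_strip_ne x p (c :: rest) (min r 4) hxp hinf
            simpa using hgoal

theorem pv_mem_runs_none (cs : List Char) (x : Char) :
    x ∈ pvRuns cs none 0 PySem.Set.empty ↔ List.replicate 5 x <:+: cs := by
  cases cs with
  | nil =>
    simp only [pvRuns]
    constructor
    · intro h; exact absurd h (by simp [PySem.Set.empty])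
    · intro h; exact absurd h (pv_not_infix_short (by simp))
  | cons c rest =>
    simp only [pvRuns]
    rw [if_neg (by simp), if_neg (by omega), pv_mem_runs x rest c 1 PySem.Set.empty]
    simp [PySem.Set.empty]

theorem pv_cond_eq (cs : List Char) (c : Char) :
    PySem.Chars.isIn (List.replicate 5 c) cs =
      PySem.Set.contains (pvRuns cs none 0 PySem.Set.empty) c := by
  rw [Bool.eq_iff_iff, PySem.Chars.isIn_iff_infix, PySem.Set.contains_iff, pv_mem_runs_none]

theorem pv_loops_eq (cs : List Char) (idxs : List Int) :
    pvAGo cs idxs = pvBGo cs (pvRuns cs none 0 PySem.Set.empty) idxs := by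
  induction idxs with
  | nil => rfl
  | cons i rest ih =>
    simp only [pvAGo, pvBGo]
    cases PySem.List.pyGet? cs i with
    | none => rfl
    | some c =>
      dsimp only
      rw [pv_cond_eq, ih]

-- ===== VERDICT (by name: the statement is the Claim_ definition above) =====
theorem fiveTimes_spec : Claim_equal_fiveTimes := by
  intro num _ _
  unfold Spec_fiveTimes fiveTimes fiveTimes_alt
  exact pv_loops_eq _ _
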